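-- pv_equiv track=rewrite | github.com/eysta00/T-111-PROG-Haust-2019 | Assignment/Assignment 12/word_list.py | unique_word_list
-- ===== SOURCE A (Python) =====
-- import string
--
-- def unique_word_list (file_open):
--     ''' Fjarlægir greinarmerkji frá orðum og skilar röðuðum einstökum orðum '''
--     unique_word_list = []
--     for line in file_open: # Sett öll orð í lista
--         line_list = line.split()
--         line_list = [word.strip(string.punctuation) for word in line_list] # Fjarlægt greinarmerkji
--
--         for element in line_list: # Flokkað einstök orð
--             if element not in unique_word_list:
--                 unique_word_list.append(element)
--
--     unique_word_list.sort()
--     return unique_word_list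
-- ===== SOURCE B (Python) =====
-- import string
--
-- def unique_word_list(file_open):
--     ''' Flatten all stripped words, sort once, then dedup adjacent duplicates. '''
--     words = [word.strip(string.punctuation)
--              for line in file_open
--              for word in line.split()]
--     words.sort()
--     result = []
--     prev = None
--     for w in words:
--         if prev is None or w != prev:
--             result.append(w)
--             prev = w
--     return result
-- ===== Notes on version B (the rewrite author's own statement) =====
-- stated objective: faster
-- what changed: A dedups with an 'element not in list' membership scan inside the loop and sorts the deduped list; B flattens all stripped words, sorts the full multiset once, and removes duplicates in one adjacent-comparison pass over the sorted list.
import Mathlib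
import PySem

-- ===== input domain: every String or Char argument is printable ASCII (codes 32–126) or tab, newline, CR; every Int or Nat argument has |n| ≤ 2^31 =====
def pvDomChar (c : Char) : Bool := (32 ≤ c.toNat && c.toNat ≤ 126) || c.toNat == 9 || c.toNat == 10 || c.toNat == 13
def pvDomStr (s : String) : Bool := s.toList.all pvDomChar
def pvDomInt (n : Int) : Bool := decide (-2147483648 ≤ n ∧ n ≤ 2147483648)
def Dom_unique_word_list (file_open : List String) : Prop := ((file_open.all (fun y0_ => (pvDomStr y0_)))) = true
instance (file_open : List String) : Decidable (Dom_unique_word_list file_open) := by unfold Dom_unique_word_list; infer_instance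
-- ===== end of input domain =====

-- B replaces A's quadratic in-loop `not in` membership dedup by: flatten all stripped
-- words, sort the full list once, and drop adjacent duplicates in one linear pass.

def pvPunct : String := "!\"#$%&'()*+,-./:;<=>?@[\\]^_`{|}~"

-- ===== PORT A =====
-- for line in file_open: split, strip punctuation, append each word not already present; then sort
def unique_word_list (file_open : List String) : List String :=
  let u := file_open.foldl (fun acc line =>
    let line_list := (PySem.Str.split₀ line).map (fun word => PySem.Str.stripChars word pvPunct)
    line_list.foldl (fun a element => if element ∈ a then a else a ++ [element]) acc) []
  PySem.List.sorted u (fun x => x) false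

-- ===== PORT B =====
-- flatten all stripped words, sort once, then one pass comparing with the previous kept word
def unique_word_list_alt (file_open : List String) : List String :=
  let words := file_open.flatMap (fun line =>
    (PySem.Str.split₀ line).map (fun word => PySem.Str.stripChars word pvPunct))
  let ws := PySem.List.sorted words (fun x => x) false
  (ws.foldl (fun (st : Option String × List String) w =>
      if st.1 = none ∨ st.1 ≠ some w then (some w, st.2 ++ [w]) else st)
    (none, [])).2

-- ===== PRECONDITION & SPEC =====
def Spec_unique_word_list (file_open : List String) (out : List String) : Prop := out = unique_word_list_alt file_open
instance (file_open : List String) (out : List String) : Decidable (Spec_unique_word_list file_open out) := by unfold Spec_unique_word_list; infer_instance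

-- ===== CLAIM (what is proved, stated in full; the proofs are below) =====
def Claim_equal_unique_word_list : Prop := ∀ (file_open : List String), Dom_unique_word_list file_open → Spec_unique_word_list file_open (unique_word_list file_open)

-- ===== LEMMAS AND PROOFS =====

-- A's dedup step as a name
def pvDedupStep (a : List String) (e : String) : List String := if e ∈ a then a else a ++ [e]

-- B's adjacent-dedup, recursively (the fold in the port is proved equal to it)
def pvAdj : Option String → List String → List String
  | _, [] => []
  | p, x :: t => if p = none ∨ p ≠ some x then x :: pvAdj (some x) t else pvAdj p t

lemma foldl_eq_pvAdj (l : List String) : ∀ (p : Option String) (res : List String),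
    (l.foldl (fun (st : Option String × List String) w =>
      if st.1 = none ∨ st.1 ≠ some w then (some w, st.2 ++ [w]) else st) (p, res)).2
    = res ++ pvAdj p l := by
  induction l with
  | nil => intro p res; simp [pvAdj]
  | cons x t ih =>
    intro p res
    by_cases h : p = none ∨ p ≠ some x
    · simp only [List.foldl_cons, pvAdj, if_pos h, ih]
      simp
    · simp only [List.foldl_cons, pvAdj, if_neg h, ih]

lemma mem_pvAdj_some (l : List String) (h : l.Pairwise (· ≤ ·)) :
    ∀ (q : String), (∀ z ∈ l, q ≤ z) → ∀ (y : String),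
    (y ∈ pvAdj (some q) l ↔ y ∈ l ∧ y ≠ q) := by
  induction l with
  | nil => intro q _ y; simp [pvAdj]
  | cons x t ih =>
    rcases List.pairwise_cons.mp h with ⟨hx, ht⟩
    intro q hq y
    by_cases hqx : q = x
    · subst hqx
      have : pvAdj (some q) (q :: t) = pvAdj (some q) t := by simp [pvAdj]
      rw [this, ih ht q hx y]
      constructor
      · rintro ⟨hy, hne⟩; exact ⟨List.mem_cons_of_mem _ hy, hne⟩
      · rintro ⟨hy, hne⟩
        rcases List.mem_cons.mp hy with rfl | hy
        · exact absurd rfl hne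
        · exact ⟨hy, hne⟩
    · have hlt : q < x := lt_of_le_of_ne (hq x (List.mem_cons_self)) hqx
      have : pvAdj (some q) (x :: t) = x :: pvAdj (some x) t := by
        simp [pvAdj, show some q ≠ some x from by simp [hqx]]
      rw [this]
      simp only [List.mem_cons, ih ht x hx y]
      constructor
      · rintro (rfl | ⟨hy, hne⟩)
        · exact ⟨Or.inl rfl, fun he => hqx he.symm⟩
        · exact ⟨Or.inr hy, (lt_of_lt_of_le hlt (hx y hy)).ne'⟩
      · rintro ⟨rfl | hy, hne⟩
        · exact Or.inl rfl
        · by_cases hyx : y = x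
          · exact Or.inl hyx
          · exact Or.inr ⟨hy, hyx⟩

lemma mem_pvAdj_none (l : List String) (h : l.Pairwise (· ≤ ·)) (y : String) :
    y ∈ pvAdj none l ↔ y ∈ l := by
  cases l with
  | nil => simp [pvAdj]
  | cons x t =>
    rcases List.pairwise_cons.mp h with ⟨hx, ht⟩
    have : pvAdj none (x :: t) = x :: pvAdj (some x) t := by simp [pvAdj]
    rw [this]
    simp only [List.mem_cons, mem_pvAdj_some t ht x hx y]
    constructor
    · rintro (rfl | ⟨hy, _⟩)
      · exact Or.inl rfl
      · exact Or.inr hy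
    · rintro (rfl | hy)
      · exact Or.inl rfl
      · by_cases hyx : y = x
        · exact Or.inl hyx
        · exact Or.inr ⟨hy, hyx⟩

lemma pairwise_pvAdj_some (l : List String) (h : l.Pairwise (· ≤ ·)) :
    ∀ (q : String), (∀ z ∈ l, q ≤ z) → (pvAdj (some q) l).Pairwise (· < ·) := by
  induction l with
  | nil => intro q _; simp [pvAdj]
  | cons x t ih =>
    rcases List.pairwise_cons.mp h with ⟨hx, ht⟩
    intro q hq
    by_cases hqx : q = x
    · subst hqx
      have : pvAdj (some q) (q :: t) = pvAdj (some q) t := by simp [pvAdj]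
      rw [this]; exact ih ht q hx
    · have : pvAdj (some q) (x :: t) = x :: pvAdj (some x) t := by
        simp [pvAdj, show some q ≠ some x from by simp [hqx]]
      rw [this]
      refine List.pairwise_cons.mpr ⟨?_, ih ht x hx⟩
      intro y hy
      rcases (mem_pvAdj_some t ht x hx y).mp hy with ⟨hyt, hne⟩
      exact lt_of_le_of_ne (hx y hyt) (fun he => hne he.symm)

lemma pairwise_pvAdj_none (l : List String) (h : l.Pairwise (· ≤ ·)) :
    (pvAdj none l).Pairwise (· < ·) := by
  cases l with
  | nil => simp [pvAdj]
  | cons x t =>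
    rcases List.pairwise_cons.mp h with ⟨hx, ht⟩
    have : pvAdj none (x :: t) = x :: pvAdj (some x) t := by simp [pvAdj]
    rw [this]
    refine List.pairwise_cons.mpr ⟨?_, pairwise_pvAdj_some t ht x hx⟩
    intro y hy
    rcases (mem_pvAdj_some t ht x hx y).mp hy with ⟨hyt, hne⟩
    exact lt_of_le_of_ne (hx y hyt) (fun he => hne he.symm)

-- A's accumulator: membership and nodup
lemma mem_foldl_dedup (l : List String) : ∀ (acc : List String) (y : String),
    y ∈ l.foldl pvDedupStep acc ↔ y ∈ acc ∨ y ∈ l := by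
  induction l with
  | nil => simp
  | cons x t ih =>
    intro acc y
    by_cases h : x ∈ acc
    · simp only [List.foldl_cons, pvDedupStep, if_pos h, ih]
      constructor
      · rintro (hy | hy)
        · exact Or.inl hy
        · exact Or.inr (List.mem_cons_of_mem _ hy)
      · rintro (hy | hy)
        · exact Or.inl hy
        · rcases List.mem_cons.mp hy with rfl | hy
          · exact Or.inl h
          · exact Or.inr hy
    · simp only [List.foldl_cons, pvDedupStep, if_neg h, ih]
      simp only [List.mem_append, List.mem_cons]
      tauto

lemma nodup_foldl_dedup (l : List String) : ∀ (acc : List String), acc.Nodup →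
    (l.foldl pvDedupStep acc).Nodup := by
  induction l with
  | nil => intro acc h; simpa
  | cons x t ih =>
    intro acc h
    by_cases hx : x ∈ acc
    · simpa [pvDedupStep, hx] using ih acc h
    · rw [List.foldl_cons]
      have hstep : pvDedupStep acc x = acc ++ [x] := by simp [pvDedupStep, hx]
      rw [hstep]
      refine ih _ ?_
      rw [List.nodup_append]
      refine ⟨h, List.nodup_singleton x, ?_⟩
      intro a ha b hb
      rw [List.mem_singleton] at hb
      subst hb
      exact fun he => hx (he ▸ ha)

-- the nested A-loop builds the same accumulator as one dedup fold over the flattened words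
lemma foldl_nested_eq_flatMap (g : String → List String) (l : List String) :
    ∀ (acc : List String),
    l.foldl (fun acc line => (g line).foldl pvDedupStep acc) acc
      = (l.flatMap g).foldl pvDedupStep acc := by
  induction l with
  | nil => intro acc; simp
  | cons x t ih => intro acc; simp [List.foldl_append, ih]

lemma main_lemma (file_open : List String) :
    unique_word_list file_open = unique_word_list_alt file_open := by
  unfold unique_word_list unique_word_list_alt
  set g : String → List String :=
    fun line => (PySem.Str.split₀ line).map (fun word => PySem.Str.stripChars word pvPunct) with hg
  set words := file_open.flatMap g with hw
  have hA : file_open.foldl (fun acc line =>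
      (g line).foldl (fun a element => if element ∈ a then a else a ++ [element]) acc) []
      = words.foldl pvDedupStep [] := by
    rw [hw]; exact foldl_nested_eq_flatMap g file_open []
  rw [hA, foldl_eq_pvAdj]
  set sw := PySem.List.sorted words (fun x => x) false with hsw
  have hswp : sw.Pairwise (· ≤ ·) := by
    simpa using PySem.List.sorted_pairwise words (fun x => x)
  have hpw : (pvAdj none sw).Pairwise (· < ·) := pairwise_pvAdj_none sw hswp
  have hnd1 : (pvAdj none sw).Nodup := hpw.imp ne_of_lt
  have hnd2 : (words.foldl pvDedupStep []).Nodup := nodup_foldl_dedup words [] List.nodup_nil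
  have hmem : ∀ y, y ∈ pvAdj none sw ↔ y ∈ words.foldl pvDedupStep [] := by
    intro y
    rw [mem_pvAdj_none sw hswp y, mem_foldl_dedup words [] y, hsw,
      PySem.List.mem_sorted]
    simp
  have hperm : (pvAdj none sw).Perm (words.foldl pvDedupStep []) := by
    refine List.perm_of_nodup_nodup_toFinset_eq hnd1 hnd2 ?_
    ext y; simp [List.mem_toFinset, hmem y]
  have := PySem.List.sorted_eq_of_perm_of_pairwise_lt
    (words.foldl pvDedupStep []) (pvAdj none sw) (fun x => x) hperm (by simpa using hpw)
  simpa using this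

-- ===== VERDICT (by name: the statement is the Claim_ definition above) =====
theorem unique_word_list_spec : Claim_equal_unique_word_list := by
  intro file_open _
  unfold Spec_unique_word_list
  exact main_lemma file_open
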